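-- pv_equiv track=rewrite | github.com/pypi-data/pypi-mirror-162 | packages/Unit-Test-Helper/Unit_Test_Helper-0.0.2.tar.gz/Unit_Test_Helper-0.0.2/src/Unit_Test_Helper/case_generator.py | set_generator
-- ===== SOURCE A (Python) =====
-- import itertools
-- from typing import Any, List, Tuple
--
-- class Param_Wrapper():
--     """Wraps an argument and it's restrictions. Also includes some useful methods for checking legality
--     of this arguments set and for converting between 1D and 2D idx representations.
--
--     Args:
--         value: value to wrap
--         restrictions: A list of restrictions for this arg in the from of Tuple[int, int, int].
--         First two ints represents x,y idx of restricted object and third int represents relationship, 1 included, 0 excluded.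
--     """
--
--     def __init__(self, value: Any, restrictions: List[Tuple[int, int, int]] = []) -> None:
--         self.value = value
--         self.restrictions = restrictions #list_idx, set_idx, restriction_type(1 included, 0 excluded)
--
--     def __repr__(self):
--         return self.value
--
--     def __str__(self):
--         return self.value
--
--     @staticmethod
--     def convert_1d_idx_to_2d(d1_val: str, D2_list: List[list]) -> Tuple[int, int]:
--         """takes 1D mapped value and finds the 2D equivalent and returns idx of that element in passed D2_list."""
--         int_d1 = int(d1_val)
--         idx1 = 0
--         sum_idx = 0
--         dims = (len(inner_list) for inner_list in D2_list)
--
--         for dim_size in dims: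
--             if sum_idx + dim_size > int_d1:
--                 break
--
--             sum_idx += dim_size
--             idx1+=1
--
--         idx2 = int_d1 - sum_idx
--
--         return idx1, idx2
--
--     @staticmethod
--     def set_dim_converter(d1_val: str, D2_list: List[list]) -> Any:
--         """Given mapped 1d idx value and 2D list return corresponding value in 2D list"""
--         idx1, idx2 = Param_Wrapper.convert_1d_idx_to_2d(d1_val, D2_list)
--         return D2_list[idx1][idx2]
--
--     def legal_set(self, p_set: set, o_set_dims: tuple) -> bool:
--         """Checks if this wrapper can legally belong to passed set.
--
--         Args:
--             p_set: set this object belongs to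
--             o_set_dims:  dimensions of original 2D list
--
--         returns: bool indicating if legal"""
--         if len(self.restrictions) == 0: #no restriction always legal
--             return True
--         include_set: set = set() #obj that must be in same set
--         exclude_set: set = set() #obj that cannot be in same set
--
--         for restriction in self.restrictions:
--             #converts from 2D representation used in restriction to 1D used in sets
--             set_val = sum([val for idx, val in enumerate(o_set_dims) if idx < restriction[0]]) + restriction[1]
--             str_set_val = str(set_val) #needs to be a str before being added
--
--             if restriction[2] == 1:
--                 include_set.add(str_set_val)
--             elif restriction[2] == 0:
--                 exclude_set.add(str_set_val)
--             else:
--                 raise ValueError("passed bad restriction value {0}. restrictions must be 0: exclusive or 1: inclusive".format(restriction[2]))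
--
--         valid_exclude_set = len(exclude_set & p_set) == 0 #make sure we have no elements from exclude set
--         return include_set.issubset(p_set) and valid_exclude_set
--
-- def set_generator(param_vars: List[List[Param_Wrapper]]) -> List[set]:
--     """Takes nested list of Param_Wrapper and maps each element to unique value based on it's location in nested List.
--
--     Example if we had a Nested list with dimensions (3,2,3) the value assigned to parameter at idx (1,1) would be 4[3 * 1 + 1],
--     while idx (2,1) would be 6 [3*1 + 2*1 + 1].
--
--     returns:
--         List of sets with mapped values"""
--     counter = 0
--     var_sets = [None] * len(param_vars)
--     dims = () #tracks dimensions of inner lists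
--
--     for i, var_list in enumerate(param_vars):
--         sub_var_set = [None] * len(var_list)
--
--         for j, _ in enumerate(var_list):
--             sub_var_set[j] = str(counter)
--             counter += 1
--
--         var_sets[i] = sub_var_set
--         dims += (len(var_list),) # add length of inner list to dims
--
--     var_sets = [set(val)  for val in itertools.product(*var_sets)] #get iterable product of all our combinations
--     return var_sets
-- ===== SOURCE B (Python) =====
-- def set_generator(param_vars):
--     # Mixed-radix index decoding: each output combo is decoded directly from a
--     # flat index n in range(total), instead of materialising labeled lists and
--     # taking their Cartesian product.
--     dims = [len(sub) for sub in param_vars]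
--     offsets = []
--     t = 0
--     for d in dims:
--         offsets.append(t)
--         t += d
--     strides = []
--     s = 1
--     for d in reversed(dims):
--         strides.append(s)
--         s *= d
--     strides.reverse()
--     return [set(str(off + (n // st) % d)
--                 for off, st, d in zip(offsets, strides, dims))
--             for n in range(s)]
-- ===== Notes on version B (the rewrite author's own statement) =====
-- stated objective: alternative
-- what changed: B never materialises labeled lists or a Cartesian product: it computes per-list offsets and suffix-product strides once, then decodes each output combination directly from its flat index n by mixed-radix arithmetic ((n // stride) % dim).
import Mathlib
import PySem

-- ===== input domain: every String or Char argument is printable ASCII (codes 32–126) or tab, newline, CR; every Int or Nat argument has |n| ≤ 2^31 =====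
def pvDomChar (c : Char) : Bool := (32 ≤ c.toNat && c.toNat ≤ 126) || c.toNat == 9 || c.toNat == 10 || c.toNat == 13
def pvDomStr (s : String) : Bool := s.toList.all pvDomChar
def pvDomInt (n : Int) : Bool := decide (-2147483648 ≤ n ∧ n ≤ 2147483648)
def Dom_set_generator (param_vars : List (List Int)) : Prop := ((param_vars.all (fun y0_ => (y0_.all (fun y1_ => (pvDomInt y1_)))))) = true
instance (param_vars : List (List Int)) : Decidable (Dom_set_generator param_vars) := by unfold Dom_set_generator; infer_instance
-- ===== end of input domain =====

-- B decodes each output combination directly from a flat index by mixed-radix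
-- division (offsets + suffix-product strides) instead of labeling every element and
-- forming the Cartesian product of the labeled lists (objective: alternative).

-- ===== PORT A =====
-- itertools.product(*lists), ported as the standard right fold producing tuples in
-- lexicographic order (exact for itertools.product of lists).
def pyItProduct (ls : List (List String)) : List (List String) :=
  ls.foldr (fun xs acc => xs.flatMap (fun x => acc.map (fun t => x :: t))) [[]]

def set_generator (param_vars : List (List Int)) : List (List String) :=
  -- counter = 0; var_sets = []; for var_list: inner loop assigning str(counter), counter += 1
  let st := param_vars.foldl
    (fun (st : Int × List (List String)) var_list =>
      let inner := var_list.foldl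
        (fun (s : Int × List String) _ => (s.1 + 1, s.2 ++ [PySem.Int.toStr s.1]))
        (st.1, [])
      (inner.1, st.2 ++ [inner.2]))
    (0, [])
  -- (dims is computed by A but never used for the result)
  (pyItProduct st.2).map (fun t => PySem.Set.ofList t)

-- ===== PORT B =====
def set_generator_alt (param_vars : List (List Int)) : List (List String) :=
  let dims : List Int := param_vars.map (fun sub => (sub.length : Int))
  let offsets := (dims.foldl (fun (st : Int × List Int) d => (st.1 + d, st.2 ++ [st.1])) (0, [])).2
  let stp := dims.reverse.foldl (fun (st : Int × List Int) d => (st.1 * d, st.2 ++ [st.1])) (1, [])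
  let strides := stp.2.reverse
  (PySem.List.pyRange 0 stp.1 1).map (fun n =>
    PySem.Set.ofList ((offsets.zip (strides.zip dims)).map
      (fun t => PySem.Int.toStr (t.1 + PySem.Int.mod (PySem.Int.floordiv n t.2.1) t.2.2))))

-- ===== PRECONDITION & SPEC =====
def Spec_set_generator (param_vars : List (List Int)) (out : List (List String)) : Prop := out = set_generator_alt param_vars
instance (param_vars : List (List Int)) (out : List (List String)) : Decidable (Spec_set_generator param_vars out) := by unfold Spec_set_generator; infer_instance

-- ===== CLAIM (what is proved, stated in full; the proofs are below) =====
def Claim_equal_set_generator : Prop := ∀ (param_vars : List (List Int)), Dom_set_generator param_vars → Spec_set_generator param_vars (set_generator param_vars)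

-- ===== LEMMAS AND PROOFS =====

-- product of the inner-list lengths
def Pd (pv : List (List Int)) : Nat := (pv.map List.length).prod

-- the labeled lists A builds (offsets written explicitly)
def Lab (c : Int) : List (List Int) → List (List String)
  | [] => []
  | xs :: r => (List.range xs.length).map (fun (j : Nat) => PySem.Int.toStr (c + (j : Int))) :: Lab (c + (xs.length : Int)) r

-- recursive mixed-radix decode of flat index n (the spec both sides meet)
def dec (c : Int) : List (List Int) → Nat → List String
  | [], _ => []
  | xs :: r, n => PySem.Int.toStr (c + ((n / Pd r : Nat) : Int)) :: dec (c + (xs.length : Int)) r (n % Pd r)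

-- B's flat decode with a GLOBAL index (before reduction modulo the suffix product)
def decF (k : Nat) (c : Int) : List (List Int) → List String
  | [] => []
  | xs :: r => PySem.Int.toStr (c + (((k / Pd r) % xs.length : Nat) : Int)) :: decF k (c + (xs.length : Int)) r

-- B's flat decode over Int, as the zipped map computes it
def zdec (n : Int) (c : Int) : List (List Int) → List String
  | [] => []
  | xs :: r => PySem.Int.toStr (c + PySem.Int.mod (PySem.Int.floordiv n ((Pd r : Nat) : Int)) ((xs.length : Nat) : Int)) :: zdec n (c + (xs.length : Int)) r

def offsL (c : Int) : List Int → List Int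
  | [] => []
  | d :: ds => c :: offsL (c + d) ds

def sps (s : Int) : List Int → List Int
  | [] => []
  | d :: es => s :: sps (s * d) es

def strR : List (List Int) → List Int
  | [] => []
  | _ :: r => ((Pd r : Nat) : Int) :: strR r

-- ---- A side ----

theorem inner_loop_eq (xs : List Int) (c : Int) (acc : List String) :
    xs.foldl (fun (s : Int × List String) _ => (s.1 + 1, s.2 ++ [PySem.Int.toStr s.1])) (c, acc)
      = (c + (xs.length : Int),
         acc ++ (List.range xs.length).map (fun (j : Nat) => PySem.Int.toStr (c + (j : Int)))) := by
  induction xs generalizing c acc with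
  | nil => simp
  | cons x xs ih =>
      simp only [List.foldl_cons, ih, List.length_cons]
      rw [Prod.mk.injEq]
      refine ⟨by push_cast; ring, ?_⟩
      rw [List.range_succ_eq_map]
      simp only [List.map_cons, List.map_map, List.append_assoc, List.singleton_append,
        Nat.cast_zero, add_zero]
      refine congrArg₂ (· ++ ·) rfl (congrArg₂ List.cons rfl ?_)
      refine List.map_congr_left (fun j _ => ?_)
      simp only [Function.comp_apply]
      congr 1
      push_cast; ring

theorem foldA_eq (pv : List (List Int)) (c : Int) (acc : List (List String)) :
    pv.foldl
      (fun (st : Int × List (List String)) var_list =>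
        let inner := var_list.foldl
          (fun (s : Int × List String) _ => (s.1 + 1, s.2 ++ [PySem.Int.toStr s.1]))
          (st.1, [])
        (inner.1, st.2 ++ [inner.2])) (c, acc)
    = (c + ((pv.map List.length).sum : Int), acc ++ Lab c pv) := by
  induction pv generalizing c acc with
  | nil => simp [Lab]
  | cons xs r ih =>
      simp only [List.foldl_cons]
      rw [inner_loop_eq, List.nil_append, ih]
      rw [Prod.mk.injEq]
      refine ⟨by simp only [List.map_cons, List.sum_cons]; push_cast; ring, ?_⟩
      show acc ++ [_] ++ _ = acc ++ (_ :: _)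
      simp [List.append_assoc]

theorem range_mul_flatMap {α : Type} (m P : Nat) (f : Nat → α) :
    (List.range (m * P)).map f
      = (List.range m).flatMap (fun j => (List.range P).map (fun k => f (j * P + k))) := by
  induction m with
  | zero => simp
  | succ m ih =>
      have : (m + 1) * P = m * P + P := by ring
      rw [this, List.range_add, List.map_append, ih, List.range_succ, List.flatMap_append]
      simp [List.map_map, Function.comp, Nat.mul_comm]

theorem prod_range (pv : List (List Int)) (c : Int) :
    pyItProduct (Lab c pv) = (List.range (Pd pv)).map (dec c pv) := by
  induction pv generalizing c with
  | nil => simp [pyItProduct, Lab, Pd, dec, List.range_one]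
  | cons xs r ih =>
      have hPd : Pd (xs :: r) = xs.length * Pd r := by simp [Pd]
      rw [hPd, range_mul_flatMap]
      show ((List.range xs.length).map (fun (j : Nat) => PySem.Int.toStr (c + (j : Int)))).flatMap
          (fun x => (pyItProduct (Lab (c + (xs.length : Int)) r)).map (fun t => x :: t))
        = (List.range xs.length).flatMap
            (fun j => (List.range (Pd r)).map (fun k => dec c (xs :: r) (j * Pd r + k)))
      rw [ih, List.flatMap_map]
      refine List.flatMap_congr (fun j hj => ?_)
      rw [List.map_map]
      refine List.map_congr_left (fun k hk => ?_)
      have hk' : k < Pd r := List.mem_range.mp hk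
      have hP : 0 < Pd r := by omega
      have h1 : (j * Pd r + k) / Pd r = j := by
        rw [Nat.mul_comm j (Pd r), Nat.mul_add_div hP, Nat.div_eq_of_lt hk', Nat.add_zero]
      have h2 : (j * Pd r + k) % Pd r = k := by
        rw [Nat.add_comm, Nat.add_mul_mod_self_right, Nat.mod_eq_of_lt hk']
      simp only [Function.comp_apply, dec, h1, h2]

-- ---- B side ----

theorem offs_fold (ds : List Int) (c : Int) (acc : List Int) :
    ds.foldl (fun (st : Int × List Int) d => (st.1 + d, st.2 ++ [st.1])) (c, acc)
      = (c + ds.sum, acc ++ offsL c ds) := by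
  induction ds generalizing c acc with
  | nil => simp [offsL]
  | cons d ds ih => simp [List.foldl_cons, ih, offsL, add_assoc]

theorem strides_fold (es : List Int) (s : Int) (acc : List Int) :
    es.foldl (fun (st : Int × List Int) d => (st.1 * d, st.2 ++ [st.1])) (s, acc)
      = (s * es.prod, acc ++ sps s es) := by
  induction es generalizing s acc with
  | nil => simp [sps]
  | cons d es ih => simp [List.foldl_cons, ih, sps, mul_assoc]

theorem sps_append (es : List Int) (s d : Int) :
    sps s (es ++ [d]) = sps s es ++ [s * es.prod] := by
  induction es generalizing s with
  | nil => simp [sps]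
  | cons e es ih => simp [sps, ih, mul_assoc]

theorem dims_prod (pv : List (List Int)) :
    (pv.map (fun sub => ((sub.length : Nat) : Int))).prod = ((Pd pv : Nat) : Int) := by
  induction pv with
  | nil => simp [Pd]
  | cons xs r ih =>
      have hPd : Pd (xs :: r) = xs.length * Pd r := by simp [Pd]
      rw [List.map_cons, List.prod_cons, ih, hPd]
      push_cast; ring

theorem sps_rev (pv : List (List Int)) :
    (sps 1 ((pv.map (fun sub => ((sub.length : Nat) : Int))).reverse)).reverse = strR pv := by
  induction pv with
  | nil => simp [sps, strR]
  | cons xs r ih =>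
      simp only [List.map_cons, List.reverse_cons, sps_append, List.reverse_append,
        List.reverse_cons, List.reverse_nil, List.nil_append, List.singleton_append]
      rw [List.prod_reverse, dims_prod, one_mul, ih]
      rfl

theorem zipmap_eq (pv : List (List Int)) (c : Int) (n : Int) :
    ((offsL c (pv.map (fun sub => ((sub.length : Nat) : Int)))).zip
        ((strR pv).zip (pv.map (fun sub => ((sub.length : Nat) : Int))))).map
      (fun t => PySem.Int.toStr (t.1 + PySem.Int.mod (PySem.Int.floordiv n t.2.1) t.2.2))
    = zdec n c pv := by
  induction pv generalizing c with
  | nil => simp [offsL, strR, zdec]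
  | cons xs r ih => simp [offsL, strR, zdec, List.zip_cons_cons, ih]

theorem zdec_natCast (k : Nat) (c : Int) (pv : List (List Int)) :
    zdec ((k : Nat) : Int) c pv = decF k c pv := by
  induction pv generalizing c with
  | nil => rfl
  | cons xs r ih =>
      simp only [zdec, decF, PySem.Int.floordiv_natCast, PySem.Int.mod_natCast, ih]

theorem decF_mod (pv : List (List Int)) (c : Int) (n : Nat) :
    decF (n % Pd pv) c pv = decF n c pv := by
  induction pv generalizing c n with
  | nil => rfl
  | cons xs r ih =>
      have hPd : Pd (xs :: r) = xs.length * Pd r := by simp [Pd]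
      simp only [decF, hPd]
      congr 1
      · have hdigit : n % (xs.length * Pd r) / Pd r % xs.length = n / Pd r % xs.length := by
          rw [Nat.mul_comm xs.length (Pd r), Nat.mod_mul_right_div_self,
            Nat.mod_mod_of_dvd _ dvd_rfl]
        rw [hdigit]
      · calc decF (n % (xs.length * Pd r)) (c + (xs.length : Int)) r
            = decF (n % (xs.length * Pd r) % Pd r) (c + (xs.length : Int)) r := (ih _ _).symm
          _ = decF (n % Pd r) (c + (xs.length : Int)) r := by
                rw [Nat.mod_mod_of_dvd _ ⟨xs.length, Nat.mul_comm _ _⟩]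
          _ = decF n (c + (xs.length : Int)) r := ih _ _

theorem decF_eq_dec (pv : List (List Int)) (c : Int) (n : Nat) (h : n < Pd pv) :
    decF n c pv = dec c pv n := by
  induction pv generalizing c n with
  | nil => rfl
  | cons xs r ih =>
      have hPd : Pd (xs :: r) = xs.length * Pd r := by simp [Pd]
      rw [hPd] at h
      have hP : 0 < Pd r := Nat.pos_of_ne_zero (fun h0 => by simp [h0] at h)
      have hdiv : n / Pd r < xs.length := (Nat.div_lt_iff_lt_mul hP).mpr h
      simp only [decF, dec, Nat.mod_eq_of_lt hdiv]
      rw [← decF_mod r (c + (xs.length : Int)) n]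
      exact congrArg (List.cons _) (ih _ _ (Nat.mod_lt _ hP))

-- ===== VERDICT (by name: the statement is the Claim_ definition above) =====
theorem set_generator_spec : Claim_equal_set_generator := by
  intro pv _
  unfold Spec_set_generator set_generator set_generator_alt
  simp only [foldA_eq, List.nil_append, offs_fold, strides_fold, prod_range, List.map_map]
  rw [show (1 : Int) * ((pv.map (fun sub => ((sub.length : Nat) : Int))).reverse).prod
      = ((Pd pv : Nat) : Int) by rw [List.prod_reverse, dims_prod, one_mul]]
  rw [sps_rev]
  rw [PySem.List.pyRange_one]
  rw [List.map_map]
  simp only [sub_zero, Int.toNat_natCast]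
  refine List.map_congr_left (fun k hk => ?_)
  have hk' : k < Pd pv := List.mem_range.mp hk
  simp only [Function.comp_apply, zero_add]
  rw [zipmap_eq, zdec_natCast, decF_eq_dec _ _ _ hk']
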